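-- pv_equiv track=rewrite | github.com/baophucbatdongsan-droid/heighttech-os | apps/core/metrics.py | path_prefix
-- ===== SOURCE A (Python) =====
-- def path_prefix(path: str) -> str:
--     """
--     Gom path thành prefix để tránh label quá nhiều (cardinality explosion).
--     """
--     if not path:
--         return "/"
--     for p in ("/api/", "/dashboard/", "/admin/"):
--         if path.startswith(p):
--             return p
--
--     # fallback: lấy cấp 1
--     parts = path.split("/")
--     if len(parts) > 1 and parts[1]:
--         return f"/{parts[1]}/"
--     return "/"
-- ===== SOURCE B (Python) =====
-- def path_prefix(path: str) -> str:
--     # Simpler: the candidate-prefix loop is redundant -- for any path starting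
--     # with "/api/", "/dashboard/" or "/admin/" the first split segment already
--     # reproduces exactly that prefix, so compute directly from the split.
--     if not path:
--         return "/"
--     parts = path.split("/")
--     if len(parts) > 1 and parts[1]:
--         return f"/{parts[1]}/"
--     return "/"
-- ===== Notes on version B (the rewrite author's own statement) =====
-- stated objective: simpler
-- what changed: Drops the loop over the three candidate prefixes entirely and computes the label directly from the first segment of path.split('/'), exploiting that the fallback already reproduces those prefixes.
import Mathlib
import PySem

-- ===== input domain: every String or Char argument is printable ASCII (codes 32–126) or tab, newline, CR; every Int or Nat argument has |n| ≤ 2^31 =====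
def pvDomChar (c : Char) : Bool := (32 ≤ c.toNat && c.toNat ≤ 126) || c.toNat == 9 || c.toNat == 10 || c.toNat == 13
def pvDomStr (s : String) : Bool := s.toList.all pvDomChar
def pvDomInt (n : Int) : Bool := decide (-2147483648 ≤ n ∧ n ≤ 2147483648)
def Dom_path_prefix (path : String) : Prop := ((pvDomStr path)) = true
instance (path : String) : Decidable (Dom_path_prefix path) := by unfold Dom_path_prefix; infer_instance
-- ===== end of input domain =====

-- B drops A's loop over the three candidate prefixes and computes the label
-- directly from the first segment of path.split("/") (objective: simpler).

-- ===== PORT A =====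
-- A's `for p in (...)` loop with early return
def prefixLoop (path : String) : List String → Option String
  | [] => none
  | p :: ps => if PySem.Str.startswith path p then some p else prefixLoop path ps

def path_prefix (path : String) : String :=
  if path = "" then "/"
  else
    match prefixLoop path ["/api/", "/dashboard/", "/admin/"] with
    | some p => p
    | none =>
      let parts := (PySem.Str.split? path "/").getD []   -- "/" ≠ "": split? is always `some` here
      if parts.length > 1 ∧ parts.getD 1 "" ≠ "" then "/" ++ parts.getD 1 "" ++ "/" else "/"

-- ===== PORT B =====
def path_prefix_alt (path : String) : String :=
  if path = "" then "/"
  else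
    let parts := (PySem.Str.split? path "/").getD []   -- "/" ≠ "": split? is always `some` here
    if parts.length > 1 ∧ parts.getD 1 "" ≠ "" then "/" ++ parts.getD 1 "" ++ "/" else "/"

-- ===== PRECONDITION & SPEC =====
def Spec_path_prefix (path : String) (out : String) : Prop := out = path_prefix_alt path
instance (path : String) (out : String) : Decidable (Spec_path_prefix path out) := by unfold Spec_path_prefix; infer_instance

-- ===== CLAIM (what is proved, stated in full; the proofs are below) =====
def Claim_equal_path_prefix : Prop := ∀ (path : String), Dom_path_prefix path → Spec_path_prefix path (path_prefix path)

-- ===== LEMMAS AND PROOFS =====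

-- simple reference version of Python's split on "/"
def mySplit : List Char → List (List Char)
  | [] => [[]]
  | c :: t =>
    if c = '/' then [] :: mySplit t
    else
      match mySplit t with
      | [] => [[c]]
      | h :: r => (c :: h) :: r

lemma mySplit_ne_nil (l : List Char) : mySplit l ≠ [] := by
  cases l with
  | nil => simp [mySplit]
  | cons c t =>
    simp only [mySplit]
    split <;> [simp; (split <;> simp)]

lemma splitOn_go_eq : ∀ (fuel : Nat) (l cur : List Char) (acc : List (List Char)),
    l.length < fuel →
    PySem.Chars.splitOn.go ['/'] fuel l cur acc
      = acc.reverse ++ (match mySplit l with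
          | [] => [cur.reverse]
          | h :: r => (cur.reverse ++ h) :: r) := by
  intro fuel
  induction fuel with
  | zero => intro l cur acc h; omega
  | succ n ih =>
    intro l cur acc h
    cases l with
    | nil => simp [PySem.Chars.splitOn.go, mySplit]
    | cons c t =>
      by_cases hc : c = '/'
      · subst hc
        have hpre : List.isPrefixOf ['/'] ('/' :: t) = true := by simp [List.isPrefixOf]
        rw [PySem.Chars.splitOn.go, if_pos hpre]
        have hd : List.drop (['/'] : List Char).length ('/' :: t) = t := rfl
        rw [hd, ih t [] _ (by simp at h; omega)]
        rcases hsp : mySplit t with _ | ⟨hd', r⟩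
        · exact absurd hsp (mySplit_ne_nil t)
        · simp [mySplit, hsp]
      · have hbc : (('/' : Char) == c) = false := beq_eq_false_iff_ne.mpr (Ne.symm hc)
        have hpre : List.isPrefixOf ['/'] (c :: t) = false := by simp [List.isPrefixOf, hbc]
        rw [PySem.Chars.splitOn.go, if_neg (by simp [hpre])]
        rw [ih t (c :: cur) acc (by simp at h ⊢; omega)]
        simp only [mySplit, if_neg hc]
        rcases hsp : mySplit t with _ | ⟨hd', r⟩
        · exact absurd hsp (mySplit_ne_nil t)
        · simp

lemma splitOn_slash (l : List Char) : PySem.Chars.splitOn l ['/'] = mySplit l := by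
  rw [PySem.Chars.splitOn, splitOn_go_eq (l.length + 1) l [] [] (by omega)]
  rcases hsp : mySplit l with _ | ⟨hd, r⟩
  · exact absurd hsp (mySplit_ne_nil l)
  · simp

lemma mySplit_word (w : List Char) (t : List Char) (hw : '/' ∉ w) :
    mySplit (w ++ '/' :: t) = w :: mySplit t := by
  induction w with
  | nil => simp [mySplit]
  | cons c w' ih =>
    simp only [List.mem_cons, not_or] at hw
    have hc : ¬ c = '/' := fun hh => hw.1 hh.symm
    simp only [List.cons_append, mySplit, if_neg hc, ih hw.2]

-- B's value on any path of the form '/' ++ word ++ '/' ++ rest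
lemma alt_prefix (path : String) (w t : List Char) (hw : '/' ∉ w) (hw0 : w ≠ [])
    (ht : path.toList = '/' :: (w ++ '/' :: t)) :
    path_prefix_alt path = "/" ++ String.ofList w ++ "/" := by
  have hne : path ≠ "" := by
    intro h; subst h; simp at ht
  rw [path_prefix_alt, if_neg hne]
  have hslash : ("/" : String).toList = ['/'] := rfl
  have hsplit : PySem.Str.split? path "/"
      = some (String.ofList [] :: String.ofList w :: (mySplit t).map String.ofList) := by
    rw [PySem.Str.split?, PySem.Chars.split?, hslash, if_neg (by decide)]
    rw [splitOn_slash, ht]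
    have h1 : mySplit ('/' :: (w ++ '/' :: t)) = [] :: w :: mySplit t := by
      simp [mySplit, mySplit_word w t hw]
    rw [h1]
    rfl
  rw [hsplit]
  have hwne : String.ofList w ≠ "" := by
    intro h
    have := congrArg String.toList h
    simp at this
    exact hw0 this
  simp [List.getD, hwne]

theorem path_prefix_eq_alt (path : String) : path_prefix path = path_prefix_alt path := by
  by_cases h0 : path = ""
  · subst h0; rfl
  · by_cases h1 : PySem.Str.startswith path "/api/" = true
    · have hpre : "/api/".toList <+: path.toList := by
        have := (PySem.Str.startswith_eq path "/api/") ▸ h1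
        exact (PySem.Chars.startswith_iff _ _).mp this
      obtain ⟨t, ht⟩ := hpre
      have ht' : path.toList = '/' :: (['a','p','i'] ++ '/' :: t) := by
        rw [← ht]; rfl
      rw [path_prefix, if_neg h0]
      simp only [prefixLoop, if_pos h1]
      rw [alt_prefix path ['a','p','i'] t (by decide) (by decide) ht']
      rfl
    · by_cases h2 : PySem.Str.startswith path "/dashboard/" = true
      · have hpre : "/dashboard/".toList <+: path.toList := by
          have := (PySem.Str.startswith_eq path "/dashboard/") ▸ h2
          exact (PySem.Chars.startswith_iff _ _).mp this
        obtain ⟨t, ht⟩ := hpre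
        have ht' : path.toList = '/' :: (['d','a','s','h','b','o','a','r','d'] ++ '/' :: t) := by
          rw [← ht]; rfl
        rw [path_prefix, if_neg h0]
        simp only [prefixLoop, if_pos h2, if_neg h1]
        rw [alt_prefix path ['d','a','s','h','b','o','a','r','d'] t (by decide) (by decide) ht']
        rfl
      · by_cases h3 : PySem.Str.startswith path "/admin/" = true
        · have hpre : "/admin/".toList <+: path.toList := by
            have := (PySem.Str.startswith_eq path "/admin/") ▸ h3
            exact (PySem.Chars.startswith_iff _ _).mp this
          obtain ⟨t, ht⟩ := hpre
          have ht' : path.toList = '/' :: (['a','d','m','i','n'] ++ '/' :: t) := by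
            rw [← ht]; rfl
          rw [path_prefix, if_neg h0]
          simp only [prefixLoop, if_pos h3, if_neg h1, if_neg h2]
          rw [alt_prefix path ['a','d','m','i','n'] t (by decide) (by decide) ht']
          rfl
        · rw [path_prefix, path_prefix_alt, if_neg h0, if_neg h0]
          simp only [prefixLoop, if_neg h1, if_neg h2, if_neg h3]

-- ===== VERDICT (by name: the statement is the Claim_ definition above) =====
theorem path_prefix_spec : Claim_equal_path_prefix := by
  intro path _
  unfold Spec_path_prefix
  exact path_prefix_eq_alt path
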